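-- pv_equiv track=rewrite | github.com/hans0809/--- | 暴力递归.py | ways2
-- ===== SOURCE A (Python) =====
-- def ways2(N,M,K,P):
--     # 参数无效直接返回0
--     if N<2 or K<1 or M<1 or M>N or P<1 or P>N:
--         return 0
--
--     #把所有(cur,rest)加入缓存
--     #dp=[[-1]*(K+1) for _ in range(N+1)]
--     dp=[[-1 for _ in range(K+1)] for _ in range(N+1)]
--     # 上面两种写法都可以，但是写成dp=[[-1]*(K+1)]*(N+1)就不对，为什么？
--
--     def walk2(N,cur,rest,P):
--         if dp[cur][rest]!=-1:
--             return dp[cur][rest]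
--
--         ans=0
--         if rest==0:
--             ans=1 if cur==P else 0
--
--         elif cur==1:
--             ans=walk2(N,2,rest-1,P)
--
--         elif cur==N:
--             ans=walk2(N,N-1,rest-1,P)
--
--         else:
--             ans=walk2(N,cur-1,rest-1,P)+walk2(N,cur+1,rest-1,P)
--
--         dp[cur][rest]=ans
--         return ans
--     res=walk2(N,M,K,P)
--     return res
-- ===== SOURCE B (Python) =====
-- def ways2(N, M, K, P):
--     # same validity guard as the original: invalid parameters give 0
--     if N < 2 or K < 1 or M < 1 or M > N or P < 1 or P > N:
--         return 0
--     # bottom-up DP: cur[pos] = number of walks of length j from pos ending at P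
--     cur = [1 if i == P else 0 for i in range(N + 1)]
--     for _ in range(K):
--         cur = [0] + [cur[2] if pos == 1 else
--                      cur[N - 1] if pos == N else
--                      cur[pos - 1] + cur[pos + 1]
--                      for pos in range(1, N + 1)]
--     return cur[M]
-- ===== Notes on version B (the rewrite author's own statement) =====
-- stated objective: alternative
-- what changed: Replaced the top-down memoized recursion (2-D memo table plus nested recursive walk) by an iterative bottom-up DP that rolls a single length-(N+1) vector K times; no recursion and no memo table.
import Mathlib
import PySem

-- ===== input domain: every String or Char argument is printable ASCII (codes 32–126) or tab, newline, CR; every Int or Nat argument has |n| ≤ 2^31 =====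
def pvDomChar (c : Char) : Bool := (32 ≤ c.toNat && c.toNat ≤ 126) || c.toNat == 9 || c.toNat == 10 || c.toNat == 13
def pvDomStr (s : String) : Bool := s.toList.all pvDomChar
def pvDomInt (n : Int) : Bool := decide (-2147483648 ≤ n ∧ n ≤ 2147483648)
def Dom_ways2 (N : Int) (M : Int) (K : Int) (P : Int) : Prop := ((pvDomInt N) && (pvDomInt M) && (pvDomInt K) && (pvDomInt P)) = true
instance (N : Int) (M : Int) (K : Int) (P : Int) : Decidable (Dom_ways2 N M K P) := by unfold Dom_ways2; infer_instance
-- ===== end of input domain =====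

-- B replaces A's memoized top-down recursion by an iterative bottom-up rolling DP vector (alternative decomposition, same asymptotic cost).

-- ===== PORT A =====
-- Memoized recursive walk, threading the memo table dp through the calls.
-- Hand port of the list indexing: in A's execution cur is always in [1,N] and
-- rest in [0,K], so dp[cur][rest] read/write is ported exactly by
-- List.getD/List.set at cur.toNat / rest (rest is the Nat fuel: A's rest starts
-- at K ≥ 1 and only ever decreases to 0, so it is exactly K.toNat counted down).
def walkA (N P : Int) : Nat → List (List Int) → Int → Int × List (List Int)
  | 0, dp, cur =>
      let v := (dp.getD cur.toNat []).getD 0 (-1)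
      if v ≠ -1 then (v, dp)
      else
        let ans : Int := if cur = P then 1 else 0
        (ans, dp.set cur.toNat ((dp.getD cur.toNat []).set 0 ans))
  | (r+1), dp, cur =>
      let v := (dp.getD cur.toNat []).getD (r+1) (-1)
      if v ≠ -1 then (v, dp)
      else
        let res :=
          if cur = 1 then walkA N P r dp 2
          else if cur = N then walkA N P r dp (N-1)
          else
            let p1 := walkA N P r dp (cur-1)
            let p2 := walkA N P r p1.2 (cur+1)
            (p1.1 + p2.1, p2.2)
        (res.1, res.2.set cur.toNat ((res.2.getD cur.toNat []).set (r+1) res.1))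

def ways2 (N : Int) (M : Int) (K : Int) (P : Int) : Int :=
  if N < 2 ∨ K < 1 ∨ M < 1 ∨ M > N ∨ P < 1 ∨ P > N then 0
  else
    let dp : List (List Int) := List.replicate (N+1).toNat (List.replicate (K+1).toNat (-1))
    (walkA N P K.toNat dp M).1

-- ===== PORT B =====
-- One DP step: new vector [0] ++ [transition(pos) for pos in range(1, N+1)].
-- Hand port of the list indexing: every index used (2, N-1, pos±1) lies in
-- [0,N] when N ≥ 2 and 1 ≤ pos ≤ N, so Python's cur[i] is ported exactly by
-- List.getD at the (nonnegative) index.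
def stepB (N : Int) (v : List Int) : List Int :=
  0 :: (PySem.List.pyRange 1 (N+1) 1).map (fun pos =>
    if pos = 1 then v.getD 2 0
    else if pos = N then v.getD (N-1).toNat 0
    else v.getD (pos-1).toNat 0 + v.getD (pos+1).toNat 0)

def ways2_alt (N : Int) (M : Int) (K : Int) (P : Int) : Int :=
  if N < 2 ∨ K < 1 ∨ M < 1 ∨ M > N ∨ P < 1 ∨ P > N then 0
  else
    let row0 : List Int := (PySem.List.pyRange 0 (N+1) 1).map (fun i => if i = P then 1 else 0)
    let final := (PySem.List.pyRange 0 K 1).foldl (fun acc _ => stepB N acc) row0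
    final.getD M.toNat 0

-- ===== PRECONDITION & SPEC =====
-- A is total on all int inputs (the guard returns 0 on invalid parameters), so no Pre_.
def Spec_ways2 (N : Int) (M : Int) (K : Int) (P : Int) (out : Int) : Prop := out = ways2_alt N M K P
instance (N : Int) (M : Int) (K : Int) (P : Int) (out : Int) : Decidable (Spec_ways2 N M K P out) := by unfold Spec_ways2; infer_instance

-- ===== CLAIM (what is proved, stated in full; the proofs are below) =====
def Claim_equal_ways2 : Prop := ∀ (N : Int) (M : Int) (K : Int) (P : Int), Dom_ways2 N M K P → Spec_ways2 N M K P (ways2 N M K P)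

-- ===== LEMMAS AND PROOFS =====

-- Mathematical specification: fw N P rest cur = number of length-rest walks from cur to P.
def fw (N P : Int) : Nat → Int → Int
  | 0, cur => if cur = P then 1 else 0
  | (r+1), cur =>
      if cur = 1 then fw N P r 2
      else if cur = N then fw N P r (N-1)
      else fw N P r (cur-1) + fw N P r (cur+1)

-- Memo-table invariant: every non-(-1) entry dp[c][r] equals fw N P r c.
def InvA (N P : Int) (dp : List (List Int)) : Prop :=
  ∀ (c r : Nat), (dp.getD c []).getD r (-1) ≠ -1 → (dp.getD c []).getD r (-1) = fw N P r (c : Int)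

theorem getD_set_getD {α : Type} (l : List α) (i j : Nat) (x : α) (d : α) :
    (l.set i x).getD j d = if i = j ∧ i < l.length then x else l.getD j d := by
  by_cases h1 : i = j
  · subst h1
    by_cases h2 : i < l.length
    · simp [List.getD, List.getElem?_set, h2]
    · have hn : l[i]? = none := by
        rw [List.getElem?_eq_none_iff]; omega
      simp [List.getD, List.getElem?_set, h2, hn]
  · simp [List.getD, List.getElem?_set, h1]

theorem InvA_set (N P : Int) (dp : List (List Int)) (c r : Nat) (v : Int)
    (hInv : InvA N P dp) (hv : v = fw N P r (c : Int)) :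
    InvA N P (dp.set c ((dp.getD c []).set r v)) := by
  intro c' r'
  rw [getD_set_getD]
  split_ifs with h1
  · obtain ⟨rfl, _⟩ := h1
    rw [getD_set_getD]
    split_ifs with h2
    · obtain ⟨rfl, _⟩ := h2
      intro _; exact hv
    · exact hInv c r'
  · exact hInv c' r'

theorem walkA_correct (N P : Int) (hN : 2 ≤ N) :
    ∀ (rest : Nat) (dp : List (List Int)) (cur : Int), InvA N P dp →
      1 ≤ cur → cur ≤ N →
      (walkA N P rest dp cur).1 = fw N P rest cur ∧ InvA N P (walkA N P rest dp cur).2 := by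
  intro rest
  induction rest with
  | zero =>
    intro dp cur hInv h1 h2
    have hcast : ((cur.toNat : Int)) = cur := Int.toNat_of_nonneg (by omega)
    simp only [walkA]
    by_cases hmemo : (dp.getD cur.toNat []).getD 0 (-1) ≠ -1
    · rw [if_pos hmemo]
      refine ⟨?_, hInv⟩
      have hv := hInv cur.toNat 0 hmemo
      rw [hcast] at hv
      exact hv
    · rw [if_neg hmemo]
      refine ⟨by simp [fw], ?_⟩
      have := InvA_set N P dp cur.toNat 0 (if cur = P then 1 else 0) hInv
        (by rw [hcast]; simp [fw])
      simpa using this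
  | succ r ih =>
    intro dp cur hInv h1 h2
    have hcast : ((cur.toNat : Int)) = cur := Int.toNat_of_nonneg (by omega)
    simp only [walkA]
    by_cases hmemo : (dp.getD cur.toNat []).getD (r+1) (-1) ≠ -1
    · rw [if_pos hmemo]
      refine ⟨?_, hInv⟩
      have hv := hInv cur.toNat (r+1) hmemo
      rw [hcast] at hv
      exact hv
    · rw [if_neg hmemo]
      by_cases hc1 : cur = 1
      · rw [if_pos hc1]
        have h2' := ih dp 2 hInv (by omega) (by omega)
        have hval : (walkA N P r dp 2).1 = fw N P (r+1) cur := by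
          rw [h2'.1]; simp [fw, hc1]
        refine ⟨by simp [hval], ?_⟩
        have := InvA_set N P (walkA N P r dp 2).2 cur.toNat (r+1) (walkA N P r dp 2).1
          h2'.2 (by rw [hcast]; exact hval)
        simpa using this
      · rw [if_neg hc1]
        by_cases hcN : cur = N
        · rw [if_pos hcN]
          have h2' := ih dp (N-1) hInv (by omega) (by omega)
          have hval : (walkA N P r dp (N-1)).1 = fw N P (r+1) cur := by
            rw [h2'.1]; simp [fw, hc1, hcN, show N ≠ 1 by omega]
          refine ⟨by simp [hval], ?_⟩
          have := InvA_set N P (walkA N P r dp (N-1)).2 cur.toNat (r+1) (walkA N P r dp (N-1)).1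
            h2'.2 (by rw [hcast]; exact hval)
          simpa using this
        · rw [if_neg hcN]
          have p1h := ih dp (cur-1) hInv (by omega) (by omega)
          have p2h := ih (walkA N P r dp (cur-1)).2 (cur+1) p1h.2 (by omega) (by omega)
          have hval : (walkA N P r dp (cur-1)).1 + (walkA N P r (walkA N P r dp (cur-1)).2 (cur+1)).1
              = fw N P (r+1) cur := by
            rw [p1h.1, p2h.1]; simp [fw, hc1, hcN]
          refine ⟨by simp [hval], ?_⟩
          have := InvA_set N P (walkA N P r (walkA N P r dp (cur-1)).2 (cur+1)).2 cur.toNat (r+1)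
            ((walkA N P r dp (cur-1)).1 + (walkA N P r (walkA N P r dp (cur-1)).2 (cur+1)).1)
            p2h.2 (by rw [hcast]; exact hval)
          simpa using this

theorem InvA_init (N P : Int) (n k : Nat) : InvA N P (List.replicate n (List.replicate k (-1))) := by
  intro c r
  have hval : ((List.replicate n (List.replicate k (-1:Int))).getD c []).getD r (-1) = -1 := by
    rcases lt_or_ge c n with h | h
    · rcases lt_or_ge r k with h2 | h2
      · simp [List.getD, List.getElem?_replicate, h, h2]
      · have : (List.replicate k (-1:Int))[r]? = none :=
          List.getElem?_eq_none_iff.mpr (by simpa using h2)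
        simp [List.getD, h, this]
    · have : (List.replicate n (List.replicate k (-1:Int)))[c]? = none :=
        List.getElem?_eq_none_iff.mpr (by simpa using h)
      simp [List.getD, this]
  intro hne
  exact absurd hval hne

-- B-side invariant: rolling vector after j steps holds fw · j at positions 1..N.
def InvB (N P : Int) (v : List Int) (j : Nat) : Prop :=
  ∀ (p : Nat), 1 ≤ p → (p : Int) ≤ N → v.getD p 0 = fw N P j (p : Int)

theorem range_map_getD {α : Type} (f : Nat → α) (n k : Nat) (d : α) (hk : k < n) :
    ((List.range n).map f).getD k d = f k := by
  simp [List.getD, List.getElem?_map, List.getElem?_range, hk]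

theorem stepB_getD (N : Int) (hN : 2 ≤ N) (v : List Int) (p : Nat) (hp1 : 1 ≤ p) (hpN : (p : Int) ≤ N) :
    (stepB N v).getD p 0 =
      (if (p:Int) = 1 then v.getD 2 0
       else if (p:Int) = N then v.getD (N-1).toNat 0
       else v.getD (((p:Int))-1).toNat 0 + v.getD (((p:Int))+1).toNat 0) := by
  unfold stepB
  rw [PySem.List.pyRange_one]
  obtain ⟨q, rfl⟩ : ∃ q, p = q + 1 := ⟨p - 1, by omega⟩
  have hlt : q < (N + 1 - 1).toNat := by omega
  have he : (1:Int) + (q:Int) = ((q+1:Nat):Int) := by push_cast; ring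
  rw [List.getD_cons_succ, List.map_map, range_map_getD _ _ _ _ hlt, Function.comp_apply, he]

theorem InvB_step (N P : Int) (hN : 2 ≤ N) (v : List Int) (j : Nat) (h : InvB N P v j) :
    InvB N P (stepB N v) (j+1) := by
  intro p hp1 hpN
  rw [stepB_getD N hN v p hp1 hpN]
  show _ = fw N P (j+1) (p : Int)
  rw [fw]
  by_cases h1 : (p : Int) = 1
  · rw [if_pos h1, if_pos h1]
    have := h 2 (by omega) (by omega)
    simpa using this
  · rw [if_neg h1, if_neg h1]
    by_cases h2 : (p : Int) = N
    · rw [if_pos h2, if_pos h2]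
      have := h (N-1).toNat (by omega) (by omega)
      rw [this]
      congr 1
      omega
    · rw [if_neg h2, if_neg h2]
      have ha := h ((p:Int)-1).toNat (by omega) (by omega)
      have hb := h ((p:Int)+1).toNat (by omega) (by omega)
      rw [ha, hb]
      congr 2 <;> omega

theorem InvB_init (N P : Int) (hN : 2 ≤ N) :
    InvB N P ((PySem.List.pyRange 0 (N+1) 1).map (fun i => if i = P then (1:Int) else 0)) 0 := by
  intro p hp1 hpN
  rw [PySem.List.pyRange_zero]
  have hlt : p < (N+1).toNat := by omega
  simp [List.getD, List.getElem?_map, List.getElem?_range, hlt, fw]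

theorem InvB_iterate (N P : Int) (hN : 2 ≤ N) (v : List Int) (h : InvB N P v 0) (n : Nat) :
    InvB N P ((stepB N)^[n] v) n := by
  induction n with
  | zero => simpa using h
  | succ m ih => rw [Function.iterate_succ_apply']; exact InvB_step N P hN _ m ih

theorem foldl_const_range {α : Type} (s : α → α) (init : α) (n : Nat) :
    (List.range n).foldl (fun acc _ => s acc) init = s^[n] init := by
  induction n with
  | zero => rfl
  | succ m ih =>
    rw [List.range_succ, List.foldl_append, ih, Function.iterate_succ_apply']
    rfl

theorem foldl_const_pyRange {α : Type} (s : α → α) (init : α) (K : Int) :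
    (PySem.List.pyRange 0 K 1).foldl (fun acc _ => s acc) init = s^[K.toNat] init := by
  rw [PySem.List.pyRange_zero, List.foldl_map]
  exact foldl_const_range s init K.toNat

-- ===== VERDICT (by name: the statement is the Claim_ definition above) =====
theorem ways2_spec : Claim_equal_ways2 := by
  intro N M K P _hDom
  unfold Spec_ways2 ways2 ways2_alt
  by_cases hg : N < 2 ∨ K < 1 ∨ M < 1 ∨ M > N ∨ P < 1 ∨ P > N
  · rw [if_pos hg, if_pos hg]
  · rw [if_neg hg, if_neg hg]
    push_neg at hg
    obtain ⟨hN, hK, hM1, hMN, hP1, hPN⟩ := hg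
    have hA := (walkA_correct N P hN K.toNat
        (List.replicate (N+1).toNat (List.replicate (K+1).toNat (-1))) M
        (InvA_init N P _ _) hM1 hMN).1
    have hBit := InvB_iterate N P hN _ (InvB_init N P hN) K.toNat
    have hMcast : ((M.toNat : Int)) = M := Int.toNat_of_nonneg (by omega)
    have hBfinal := hBit M.toNat (by omega) (by omega)
    rw [hMcast] at hBfinal
    simp only
    rw [hA, foldl_const_pyRange (stepB N) _ K, hBfinal]
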